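-- pv_equiv track=rewrite | github.com/reserveword/Danmaku2Local | bilidown.py | get_id_extra
-- ===== SOURCE A (Python) =====
-- def get_id_extra(x: str):
--     idhead = 0
--     idtail = 0
--     for i in x:
--         if i.isdecimal():
--             idtail += 1
--         elif idtail == 0:
--             idhead += 1
--             idtail += 1
--         else:
--             break
--     try:
--         r = int(x[idhead:idtail])
--         head = x[:idhead]
--         tail = x[idtail:]
--         extra = head + tail
--         return r, extra
--     except ValueError:
--         return 0, x
-- ===== SOURCE B (Python) =====
-- import re
--
-- def get_id_extra(x: str):
--     # Idiomatic: one regex instead of the hand-rolled counter scan.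
--     m = re.match(r'(\D?)(\d+)(.*)', x, re.S)
--     if m is None:
--         return 0, x
--     return int(m.group(2)), m.group(1) + m.group(3)
-- ===== Notes on version B (the rewrite author's own statement) =====
-- stated objective: idiomatic
-- what changed: Replaced the hand-rolled two-counter character scan (idhead/idtail with break, slicing, try/except int) by a single regular-expression match '(\D?)(\d+)(.*)' whose no-match case is A's ValueError fallback.
import Mathlib
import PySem

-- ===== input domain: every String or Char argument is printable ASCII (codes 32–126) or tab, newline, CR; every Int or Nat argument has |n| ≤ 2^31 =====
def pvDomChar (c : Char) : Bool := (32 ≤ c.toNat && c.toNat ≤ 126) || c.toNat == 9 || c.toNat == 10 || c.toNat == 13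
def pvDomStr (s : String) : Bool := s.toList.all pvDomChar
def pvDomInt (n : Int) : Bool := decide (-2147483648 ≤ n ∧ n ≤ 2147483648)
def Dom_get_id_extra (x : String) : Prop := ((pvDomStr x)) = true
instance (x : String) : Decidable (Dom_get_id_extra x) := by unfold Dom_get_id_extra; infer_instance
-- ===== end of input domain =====

-- B replaces A's hand-rolled two-counter scan by a single regex match (idiomatic); same return value everywhere.

-- ===== PORT A =====
-- the for-loop over the characters with the two counters and the break
def pvScanA : List Char → Nat → Nat → Nat × Nat
  | [], idhead, idtail => (idhead, idtail)
  | c :: rest, idhead, idtail =>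
    if PySem.Chars.isdigit c then pvScanA rest idhead (idtail + 1)
    else if idtail = 0 then pvScanA rest (idhead + 1) (idtail + 1)
    else (idhead, idtail)

def get_id_extra (x : String) : Int × String :=
  let cs := x.toList
  let (idhead, idtail) := pvScanA cs 0 0
  -- x[a:b] for 0 ≤ a ≤ b is exactly (cs.drop a).take (b - a); x[:a] / x[a:] are take / drop (clamping agrees)
  match PySem.Int.ofStr? (String.mk ((cs.drop idhead).take (idtail - idhead))) with
  | some r => (r, String.mk (cs.take idhead ++ cs.drop idtail))
  | none => (0, x)

-- ===== PORT B =====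
-- re.match(r'(\D?)(\d+)(.*)', x, re.S): optional single non-digit head, then a digit run, then anything.
-- On the ASCII domain \d is exactly PySem.Chars.isdigit. int() on the matched digit run never raises
-- (the none branch of ofStr? is unreachable for a non-empty digit run).
def get_id_extra_alt (x : String) : Int × String :=
  let cs := x.toList
  let (g1, rest) :=
    match cs with
    | [] => (([] : List Char), ([] : List Char))
    | c :: cs' => if PySem.Chars.isdigit c then ([], cs) else ([c], cs')
  let digits := rest.takeWhile PySem.Chars.isdigit
  if digits.isEmpty then (0, x)
  else
    match PySem.Int.ofStr? (String.mk digits) with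
    | some n => (n, String.mk (g1 ++ rest.drop digits.length))
    | none => (0, x)

-- ===== PRECONDITION & SPEC =====
def Spec_get_id_extra (x : String) (out : Int × String) : Prop := out = get_id_extra_alt x
instance (x : String) (out : Int × String) : Decidable (Spec_get_id_extra x out) := by unfold Spec_get_id_extra; infer_instance

-- ===== CLAIM (what is proved, stated in full; the proofs are below) =====
def Claim_equal_get_id_extra : Prop := ∀ (x : String), Dom_get_id_extra x → Spec_get_id_extra x (get_id_extra x)

-- ===== LEMMAS AND PROOFS =====

-- once idtail is non-zero the loop only extends idtail along the digit prefix, then breaks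
theorem pvScanA_digit_phase :
    ∀ (cs : List Char) (h t : Nat), t ≠ 0 →
      pvScanA cs h t = (h, t + (cs.takeWhile PySem.Chars.isdigit).length) := by
  intro cs
  induction cs with
  | nil => intro h t _; simp [pvScanA]
  | cons c rest ih =>
    intro h t ht
    by_cases hc : PySem.Chars.isdigit c
    · rw [show pvScanA (c :: rest) h t = pvScanA rest h (t + 1) from by simp [pvScanA, hc],
        ih h (t + 1) (by omega)]
      simp [List.takeWhile, hc]
      omega
    · simp [pvScanA, hc, ht, List.takeWhile]

theorem take_length_takeWhile (p : Char → Bool) :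
    ∀ (l : List Char), l.take (l.takeWhile p).length = l.takeWhile p := by
  intro l
  induction l with
  | nil => rfl
  | cons c rest ih =>
    by_cases hc : p c <;> simp [List.takeWhile, hc, ih]

theorem get_id_extra_spec' (x : String) : get_id_extra x = get_id_extra_alt x := by
  have h0 : PySem.Int.ofStr? (String.mk ([] : List Char)) = none := by decide
  unfold get_id_extra get_id_extra_alt
  cases hcs : x.toList with
  | nil => simp [pvScanA, h0]
  | cons c rest =>
    have hTW := take_length_takeWhile PySem.Chars.isdigit rest
    by_cases hc : PySem.Chars.isdigit c
    · have hscan : pvScanA (c :: rest) 0 0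
          = (0, 1 + (rest.takeWhile PySem.Chars.isdigit).length) := by
        rw [show pvScanA (c :: rest) 0 0 = pvScanA rest 0 1 from by simp [pvScanA, hc]]
        exact pvScanA_digit_phase rest 0 1 (by omega)
      simp only [hscan, Nat.one_add, Nat.sub_zero, List.drop_zero, List.take_succ_cons,
        List.drop_succ_cons, hTW]
      simp [List.takeWhile, hc]
    · have hscan : pvScanA (c :: rest) 0 0
          = (1, 1 + (rest.takeWhile PySem.Chars.isdigit).length) := by
        rw [show pvScanA (c :: rest) 0 0 = pvScanA rest 1 1 from by simp [pvScanA, hc]]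
        exact pvScanA_digit_phase rest 1 1 (by omega)
      simp only [hscan, Nat.one_add, Nat.add_sub_cancel, List.drop_succ_cons,
        List.take_succ_cons, List.take_zero, List.drop_zero, hTW]
      cases hk : rest.takeWhile PySem.Chars.isdigit with
      | nil =>
        -- empty digit run: A's int('') raises (ofStr? = none), B's regex does not match
        simp [hk, h0, hc]
      | cons d ds =>
        have htake : rest.take (ds.length + 1) = d :: ds := by
          rw [hk] at hTW; simpa using hTW
        simp [htake, hk, hc]

-- ===== VERDICT (by name: the statement is the Claim_ definition above) =====
theorem get_id_extra_spec : Claim_equal_get_id_extra := by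
  intro x _
  exact get_id_extra_spec' x
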